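-- pv_equiv track=rewrite | github.com/ErickGichuki/DSA | DSA/task2.py | solution
-- ===== SOURCE A (Python) =====
-- def solution(R):
--     max_indicator = 0
--     current_length = 0
--     current_max_depth = 0
--
--     for depth in R:
--         if depth > 0:
--             current_length += 1
--             current_max_depth = max(current_max_depth, depth)
--         else:
--             if current_length >0:
--                 current_indicator = current_length * current_max_depth
--                 max_indicator = max(max_indicator, current_indicator)
--                 current_length = 0
--                 current_max_depth = 0
--
--     if current_length > 0:
--         current_indicator = current_length * current_max_depth
--         max_indicator = max(max_indicator, current_indicator)
--
--     return max_indicator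
-- ===== SOURCE B (Python) =====
-- def solution(R):
--     def segments(r):
--         i, n = 0, len(r)
--         while i < n:
--             if r[i] > 0:
--                 j = i
--                 while j < n and r[j] > 0:
--                     j += 1
--                 yield r[i:j]
--                 i = j
--             else:
--                 i += 1
--     return max((len(s) * max(s) for s in segments(R)), default=0)
-- ===== Notes on version B (the rewrite author's own statement) =====
-- stated objective: alternative
-- what changed: B first splits R into maximal positive runs and then reduces each run with len(s)*max(s), taking the max with default 0, instead of A's single flat loop that interleaves length/max tracking with manual flush-on-separator logic.
import Mathlib
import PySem

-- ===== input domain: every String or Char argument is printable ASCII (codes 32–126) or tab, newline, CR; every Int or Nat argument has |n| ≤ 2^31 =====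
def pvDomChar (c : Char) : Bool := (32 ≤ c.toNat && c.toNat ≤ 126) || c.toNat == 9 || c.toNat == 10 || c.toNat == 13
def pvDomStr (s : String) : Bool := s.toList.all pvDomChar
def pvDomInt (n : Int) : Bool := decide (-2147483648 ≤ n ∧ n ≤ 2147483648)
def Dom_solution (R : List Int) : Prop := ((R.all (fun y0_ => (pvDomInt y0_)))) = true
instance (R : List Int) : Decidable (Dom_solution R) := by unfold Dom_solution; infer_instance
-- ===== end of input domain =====

-- B splits R into maximal positive runs and reduces each run with len*max (default 0),
-- instead of A's flat loop with interleaved length/max tracking; same cost, different decomposition.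

-- ===== PORT A =====
-- one loop step of A: state = (max_indicator, current_length, current_max_depth)
def stepA (st : Int × Int × Int) (depth : Int) : Int × Int × Int :=
  if depth > 0 then (st.1, st.2.1 + 1, max st.2.2 depth)
  else if st.2.1 > 0 then (max st.1 (st.2.1 * st.2.2), 0, 0)
  else st

-- A's post-loop flush
def finishA (st : Int × Int × Int) : Int :=
  if st.2.1 > 0 then max st.1 (st.2.1 * st.2.2) else st.1

def solution (R : List Int) : Int :=
  finishA (R.foldl stepA (0, 0, 0))

-- ===== PORT B =====
-- transliteration of B: peel off the maximal positive run, score it as len*max, recurse on the rest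
def solution_alt : List Int → Int
  | [] => 0
  | x :: xs =>
    if x > 0 then
      let tw := xs.takeWhile (fun y => y > 0)
      max ((1 + (tw.length : Int)) * tw.foldl max x)
          (solution_alt (xs.dropWhile (fun y => y > 0)))
    else solution_alt xs
termination_by R => R.length
decreasing_by
  · exact Nat.lt_succ_of_le (List.length_dropWhile_le _ _)
  · simp

-- ===== PRECONDITION & SPEC =====
def Spec_solution (R : List Int) (out : Int) : Prop := out = solution_alt R
instance (R : List Int) (out : Int) : Decidable (Spec_solution R out) := by unfold Spec_solution; infer_instance

-- ===== CLAIM (what is proved, stated in full; the proofs are below) =====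
def Claim_equal_solution : Prop := ∀ (R : List Int), Dom_solution R → Spec_solution R (solution R)

-- ===== LEMMAS AND PROOFS =====

-- proof-only helper: value A's loop will produce from the middle of a run of length cl, max cm
def cont (cl cm : Int) : List Int → Int
  | [] => cl * cm
  | x :: xs => if x > 0 then cont (cl + 1) (max cm x) xs else max (cl * cm) (solution_alt xs)

theorem cont_eq (xs : List Int) : ∀ cl cm : Int, 0 < cl → 0 ≤ cm →
    cont cl cm xs =
      max ((cl + ((xs.takeWhile (fun y => y > 0)).length : Int)) *
            ((xs.takeWhile (fun y => y > 0)).foldl max cm))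
          (solution_alt (xs.dropWhile (fun y => y > 0))) := by
  induction xs with
  | nil =>
    intro cl cm hcl hcm
    simp [cont, solution_alt]
    exact mul_nonneg (le_of_lt hcl) hcm
  | cons y ys ih =>
    intro cl cm hcl hcm
    by_cases hy : y > 0
    · have h := ih (cl + 1) (max cm y) (by omega) (le_max_of_le_right (le_of_lt hy))
      simp [cont, hy, h]
      ring_nf
    · simp [cont, hy, solution_alt]

theorem solution_alt_run (x : Int) (xs : List Int) (hx : x > 0) :
    solution_alt (x :: xs) = cont 1 x xs := by
  rw [cont_eq xs 1 x one_pos (le_of_lt hx)]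
  simp [solution_alt, hx]

theorem loopA (R : List Int) : ∀ mi cl cm : Int, 0 ≤ mi → 0 ≤ cm →
    ((cl = 0 ∧ cm = 0) → finishA (R.foldl stepA (mi, cl, cm)) = max mi (solution_alt R)) ∧
    (0 < cl → finishA (R.foldl stepA (mi, cl, cm)) = max mi (cont cl cm R)) := by
  induction R with
  | nil =>
    intro mi cl cm hmi _
    constructor
    · rintro ⟨h0, _⟩
      simp [finishA, h0, solution_alt]
      omega
    · intro hcl
      simp [finishA, hcl, cont]
  | cons x xs ih =>
    intro mi cl cm hmi hcm
    constructor
    · rintro ⟨h0, h0m⟩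
      subst h0; subst h0m
      by_cases hx : x > 0
      · have h := (ih mi 1 x hmi (le_of_lt hx)).2 one_pos
        simp [List.foldl_cons, stepA, hx, max_eq_right (le_of_lt hx)] at h ⊢
        rw [h, solution_alt_run x xs hx]
      · have h := (ih mi 0 0 hmi le_rfl).1 ⟨rfl, rfl⟩
        simp [List.foldl_cons, stepA, hx] at h ⊢
        rw [h]
        simp [solution_alt, hx]
    · intro hcl
      by_cases hx : x > 0
      · have h := (ih mi (cl + 1) (max cm x) hmi (le_max_of_le_right (le_of_lt hx))).2 (by omega)
        simp [List.foldl_cons, stepA, hx] at h ⊢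
        rw [h, cont]
        simp [hx]
      · have h := (ih (max mi (cl * cm)) 0 0 (le_max_of_le_left hmi) le_rfl).1 ⟨rfl, rfl⟩
        simp [List.foldl_cons, stepA, hx, hcl] at h ⊢
        rw [h, cont]
        simp [hx]

theorem solution_alt_nonneg (R : List Int) : 0 ≤ solution_alt R := by
  induction R using solution_alt.induct with
  | case1 => simp [solution_alt]
  | case2 x xs hx ih =>
    rw [solution_alt_run x xs hx, cont_eq xs 1 x one_pos (le_of_lt hx)]
    exact le_max_of_le_right ih
  | case3 x xs hx ih => simpa [solution_alt, hx] using ih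

-- ===== VERDICT (by name: the statement is the Claim_ definition above) =====
theorem solution_spec : Claim_equal_solution := by
  intro R _
  unfold Spec_solution solution
  have h := (loopA R 0 0 0 le_rfl le_rfl).1 ⟨rfl, rfl⟩
  rw [h]
  have := solution_alt_nonneg R
  omega
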